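-- pv_equiv track=rewrite | github.com/RT-1904129/Naive-Bayes-Algorithm | Train.py | get_class_wise_denominators_likelihood
-- ===== SOURCE A (Python) =====
-- def class_wise_words_frequency_dict(X, Y):
--     class_sentence=dict()
--     for i in range(len(Y)):
--         if Y[i] not in class_sentence:
--             class_sentence[Y[i]]=""
--         class_sentence[Y[i]]=class_sentence[Y[i]]+" "+X[i]
--
--     class_wise_words_frequency=dict()
--     for class_name in class_sentence.keys():
--         class_word_dict=dict()
--         sentence=class_sentence[class_name].split()
--         for word in sentence:
--             if word not in class_word_dict:
--                 class_word_dict[word]=0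
--             class_word_dict[word]+=1
--         class_wise_words_frequency[class_name]=class_word_dict
--
--     return  class_wise_words_frequency
--
-- def get_class_wise_denominators_likelihood(X, Y):
--     class_wise_words_frequency=class_wise_words_frequency_dict(X,Y)
--     Total_string=""
--     for i in X:
--         Total_string=Total_string+" "+i
--     total_unique_word=len(list(set(Total_string.split())))
--     sum_word_in_class_dict=dict()
--     for classes in class_wise_words_frequency.keys():
--         Total_sum_word_in_class=sum(list(class_wise_words_frequency[classes].values()))
--         # considering smmothing hyperparmeter alpha=1
--         sum_word_in_class_dict[classes]=Total_sum_word_in_class+total_unique_word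
--     return sum_word_in_class_dict
-- ===== SOURCE B (Python) =====
-- def get_class_wise_denominators_likelihood(X, Y):
--     # one set of all distinct words across X, plus one integer token count per class
--     uniq = set()
--     for s in X:
--         uniq.update(s.split())
--     u = len(uniq)
--     counts = {}
--     for i in range(len(Y)):
--         n = len(X[i].split())
--         counts[Y[i]] = counts.get(Y[i], 0) + n
--     return {c: t + u for c, t in counts.items()}
-- ===== Notes on version B (the rewrite author's own statement) =====
-- stated objective: faster
-- what changed: B drops A's per-class concatenated sentence strings and per-word frequency dictionaries entirely: it computes the global unique-word count with one set built over X and accumulates a single integer token count per class (len(X[i].split()) added under key Y[i]), instead of concatenating all of a class's texts into one growing string, re-splitting it, building a word-frequency dict per class and summing its values.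
import Mathlib
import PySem

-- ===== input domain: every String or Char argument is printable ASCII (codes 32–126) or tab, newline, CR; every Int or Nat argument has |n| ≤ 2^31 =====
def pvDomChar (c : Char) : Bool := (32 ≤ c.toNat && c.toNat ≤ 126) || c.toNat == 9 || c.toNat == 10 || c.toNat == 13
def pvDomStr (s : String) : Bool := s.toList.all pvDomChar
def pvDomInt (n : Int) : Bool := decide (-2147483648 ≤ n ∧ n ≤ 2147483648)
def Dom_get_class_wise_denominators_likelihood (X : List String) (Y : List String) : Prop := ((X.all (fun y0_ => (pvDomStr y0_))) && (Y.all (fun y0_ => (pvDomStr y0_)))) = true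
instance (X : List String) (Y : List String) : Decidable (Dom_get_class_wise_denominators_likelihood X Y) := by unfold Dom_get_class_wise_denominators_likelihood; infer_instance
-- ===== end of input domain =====

-- B replaces A's per-class sentence strings and per-word frequency dictionaries by one global

-- ===== PORT A =====
-- Port of class_wise_words_frequency_dict (helper of A).  Indexing X[i]/Y[i] is ported with
-- pyGetD; this is exact on Pre_ (Y.length ≤ X.length), where every index read is in range.
def class_wise_words_frequency_dict (X : List String) (Y : List String) :
    PySem.Dict String (PySem.Dict String Int) :=
  let class_sentence : PySem.Dict String String :=
    (PySem.List.pyRange 0 (Y.length : Int) 1).foldl (fun d i =>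
      let y := PySem.List.pyGetD Y i ""
      let d := if d.contains y then d else d.insert y ""
      d.insert y (d.getD y "" ++ " " ++ PySem.List.pyGetD X i "")) PySem.Dict.empty
  class_sentence.keys.foldl (fun cw class_name =>
    let sentence := PySem.Str.split₀ (class_sentence.getD class_name "")
    let class_word_dict : PySem.Dict String Int :=
      sentence.foldl (fun cd word =>
        let cd := if cd.contains word then cd else cd.insert word 0
        cd.insert word (cd.getD word 0 + 1)) PySem.Dict.empty
    cw.insert class_name class_word_dict) PySem.Dict.empty

def get_class_wise_denominators_likelihood (X : List String) (Y : List String) :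
    List (String × Int) :=
  let class_wise_words_frequency := class_wise_words_frequency_dict X Y
  let total_string := X.foldl (fun t s => t ++ " " ++ s) ""
  let total_unique_word : Int :=
    ((PySem.Set.ofList (PySem.Str.split₀ total_string)).length : Int)
  (class_wise_words_frequency.keys.foldl (fun d classes =>
      let total_sum : Int :=
        ((class_wise_words_frequency.getD classes PySem.Dict.empty).values).sum
      d.insert classes (total_sum + total_unique_word)) PySem.Dict.empty).items

-- ===== PORT B =====
def get_class_wise_denominators_likelihood_alt (X : List String) (Y : List String) :
    List (String × Int) :=
  let uniq : PySem.Set String :=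
    X.foldl (fun s x => PySem.Set.update s (PySem.Str.split₀ x)) PySem.Set.empty
  let u : Int := (uniq.length : Int)
  let counts : PySem.Dict String Int :=
    (PySem.List.pyRange 0 (Y.length : Int) 1).foldl (fun d i =>
      let n : Int := ((PySem.Str.split₀ (PySem.List.pyGetD X i "")).length : Int)
      let y := PySem.List.pyGetD Y i ""
      d.insert y (d.getD y 0 + n)) PySem.Dict.empty
  counts.items.map (fun p => (p.1, p.2 + u))

-- ===== PRECONDITION & SPEC =====
-- A (and B alike) raises IndexError at X[i] when len(X) < len(Y); Pre_ excludes exactly that.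
def Pre_get_class_wise_denominators_likelihood (X : List String) (Y : List String) : Prop :=
  Y.length ≤ X.length
instance (X : List String) (Y : List String) :
    Decidable (Pre_get_class_wise_denominators_likelihood X Y) := by
  unfold Pre_get_class_wise_denominators_likelihood; infer_instance

def pvWitness_get_class_wise_denominators_likelihood : List String × List String :=
  (["good movie", "bad plot", "good good fun"], ["pos", "neg", "pos"])

def Spec_get_class_wise_denominators_likelihood (X : List String) (Y : List String)
    (out : List (String × Int)) : Prop :=
  out = get_class_wise_denominators_likelihood_alt X Y
instance (X : List String) (Y : List String) (out : List (String × Int)) :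
    Decidable (Spec_get_class_wise_denominators_likelihood X Y out) := by
  unfold Spec_get_class_wise_denominators_likelihood; infer_instance

-- ===== CLAIM (what is proved, stated in full; the proofs are below) =====
def Claim_equal_get_class_wise_denominators_likelihood : Prop :=
  ∀ (X : List String) (Y : List String), Dom_get_class_wise_denominators_likelihood X Y →
    Pre_get_class_wise_denominators_likelihood X Y →
    Spec_get_class_wise_denominators_likelihood X Y
      (get_class_wise_denominators_likelihood X Y)

-- ===== LEMMAS AND PROOFS =====

theorem go_acc (s : List Char) : ∀ (cur : List Char) (acc : List (List Char)),
    PySem.Chars.split₀.go s cur acc = acc.reverse ++ PySem.Chars.split₀.go s cur [] := by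
  induction s with
  | nil =>
    intro cur acc
    simp only [PySem.Chars.split₀.go]
    by_cases h : cur.isEmpty <;> simp [h]
  | cons c rest ih =>
    intro cur acc
    simp only [PySem.Chars.split₀.go]
    by_cases hs : PySem.Chars.isspace c
    · by_cases h : cur.isEmpty <;>
        simp [hs, h, ih [] acc, ih [] (cur.reverse :: acc), ih [] [cur.reverse]]
    · simp [hs, ih (c :: cur) acc]

theorem go_append_space {c : Char} (hc : PySem.Chars.isspace c = true) (b : List Char) :
    ∀ (a : List Char) (cur : List Char) (acc : List (List Char)),
    PySem.Chars.split₀.go (a ++ c :: b) cur acc =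
      PySem.Chars.split₀.go a cur acc ++ PySem.Chars.split₀.go b [] [] := by
  intro a
  induction a with
  | nil =>
    intro cur acc
    simp only [List.nil_append, PySem.Chars.split₀.go, hc, if_true]
    by_cases h : cur.isEmpty <;>
      simp [h, go_acc b [] acc, go_acc b [] (cur.reverse :: acc)]
  | cons d a' ih =>
    intro cur acc
    simp only [List.cons_append, PySem.Chars.split₀.go]
    by_cases hs : PySem.Chars.isspace d
    · by_cases h : cur.isEmpty <;> simp [hs, h, ih]
    · simp [hs, ih]

theorem chars_split0_append {c : Char} (hc : PySem.Chars.isspace c = true)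
    (a b : List Char) :
    PySem.Chars.split₀ (a ++ c :: b) = PySem.Chars.split₀ a ++ PySem.Chars.split₀ b := by
  simp only [PySem.Chars.split₀]
  exact go_append_space hc b a [] []

theorem str_split0_append (t s : String) :
    PySem.Str.split₀ (t ++ " " ++ s) = PySem.Str.split₀ t ++ PySem.Str.split₀ s := by
  simp only [PySem.Str.split₀]
  have h : (t ++ " " ++ s).toList = t.toList ++ ' ' :: s.toList := by
    simp [String.toList_append]
  rw [h, chars_split0_append (by decide), List.map_append]

theorem split0_joinSp (l : List String) :
    PySem.Str.split₀ (l.foldl (fun t s => t ++ " " ++ s) "") = l.flatMap PySem.Str.split₀ := by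
  induction l using List.reverseRecOn with
  | nil => decide
  | append_singleton l s ih =>
    rw [List.foldl_append, List.flatMap_append]
    simp only [List.foldl_cons, List.foldl_nil, List.flatMap_cons, List.flatMap_nil,
      List.append_nil]
    rw [str_split0_append, ih]

theorem getD_groupFold {κ ν β : Type} [BEq κ] [LawfulBEq κ] (op : ν → β → ν) (dflt : ν)
    (c : κ) : ∀ (P : List (κ × β)) (d : PySem.Dict κ ν),
    (P.foldl (fun d p => d.insert p.1 (op (d.getD p.1 dflt) p.2)) d).getD c dflt
      = ((P.filter (fun p => p.1 == c)).map (·.2)).foldl op (d.getD c dflt) := by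
  intro P
  induction P with
  | nil => intro d; rfl
  | cons p rest ih =>
    intro d
    simp only [List.foldl_cons, List.filter_cons]
    by_cases h : p.1 = c
    · subst h
      simp only [BEq.rfl, if_true, List.map_cons, List.foldl_cons, ih,
        PySem.Dict.getD_insert_self]
    · have hne : (p.1 == c) = false := by simp [h]
      rw [ih]
      simp [hne, PySem.Dict.getD_insert_of_ne _ _ _ (Ne.symm h)]

theorem ofList_flatMap {α β : Type} [BEq α] (g : β → List α) (l : List β) :
    PySem.Set.ofList (l.flatMap g)
      = l.foldl (fun s x => PySem.Set.update s (g x)) PySem.Set.empty := by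
  suffices h : ∀ (s : PySem.Set α),
      (l.flatMap g).foldl PySem.Set.add s = l.foldl (fun s x => PySem.Set.update s (g x)) s by
    exact h PySem.Set.empty
  induction l with
  | nil => intro s; rfl
  | cons x rest ih =>
    intro s
    simp only [List.flatMap_cons, List.foldl_append, List.foldl_cons, ih]
    rfl

theorem sum_counts_ofList {α : Type} [DecidableEq α] [BEq α] [LawfulBEq α] (W : List α) :
    ((PySem.Set.ofList W).map (fun k => ((W.count k : Nat) : Int))).sum = (W.length : Int) := by
  have hperm : (PySem.Set.ofList W).Perm W.dedup := by
    rw [List.perm_ext_iff_of_nodup (PySem.Set.nodup_ofList W) W.nodup_dedup]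
    intro a
    rw [PySem.Set.mem_ofList, List.mem_dedup]
  rw [List.Perm.sum_eq (hperm.map _)]
  rw [show (fun k => ((W.count k : Nat) : Int)) = (fun n : Nat => (n : Int)) ∘ (fun k => W.count k) from rfl]
  rw [← List.map_map, ← Nat.cast_list_sum]
  clear hperm
  have hc : ∀ k : α, @List.count α _ k W = @List.count α instBEqOfDecidableEq k W := by
    intro k
    induction W with
    | nil => rfl
    | cons b l ih => simp only [List.count_cons, ih, beq_iff_eq]
  norm_cast
  rw [show (fun k => @List.count α _ k W) = (fun k => @List.count α instBEqOfDecidableEq k W) from funext hc]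
  exact List.sum_map_count_dedup_eq_length W

-- A's setdefault-then-increment collapses to a single insert
theorem stepA_eq {ν : Type} (d : PySem.Dict String ν) (y : String) (z : ν)
    (f : ν → ν) :
    (if d.contains y then d else d.insert y z).insert y
        (f ((if d.contains y then d else d.insert y z).getD y z))
      = d.insert y (f (d.getD y z)) := by
  by_cases h : d.contains y
  · simp [h]
  · simp only [if_neg h]
    rw [PySem.Dict.getD_insert_self, PySem.Dict.insert_insert_self,
      PySem.Dict.getD_of_not_contains _ _ (by simp [h])]

def pvPairs (X Y : List String) : List (String × String) :=
  (List.range Y.length).map (fun i => (Y.getD i "", X.getD i ""))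

theorem foldl_range_pairs {σ : Type} (X Y : List String) (g : σ → String → String → σ)
    (init : σ) :
    (PySem.List.pyRange 0 (Y.length : Int) 1).foldl
        (fun d i => g d (PySem.List.pyGetD Y i "") (PySem.List.pyGetD X i "")) init
      = (pvPairs X Y).foldl (fun d p => g d p.1 p.2) init := by
  rw [PySem.List.pyRange_zero_natCast, pvPairs, List.foldl_map, List.foldl_map]
  simp [PySem.List.pyGetD_natCast]

theorem counter_values_sum (W : List String) :
    ((PySem.Dict.counter W).values).sum = (W.length : Int) := by
  have hitems := PySem.Dict.items_counter W
  have : (PySem.Dict.counter W).values = (PySem.Dict.counter W).items.map (·.2) := rfl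
  rw [this, hitems, List.map_map]
  exact sum_counts_ofList W

def pvVal (X Y : List String) (c : String) : Int :=
  ((((pvPairs X Y).filter (fun p => p.1 == c)).map
      (fun p => ((PySem.Str.split₀ p.2).length : Int))).sum)
    + ((PySem.Set.ofList (X.flatMap PySem.Str.split₀)).length : Int)

theorem length_flatMap_int (L : List String) :
    (((L.flatMap PySem.Str.split₀).length : Nat) : Int)
      = (L.map (fun s => ((PySem.Str.split₀ s).length : Int))).sum := by
  rw [List.length_flatMap, Nat.cast_list_sum, List.map_map]
  rfl

theorem portA_eq (X Y : List String) :
    get_class_wise_denominators_likelihood X Y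
      = (PySem.Set.ofList ((pvPairs X Y).map (·.1))).map (fun c => (c, pvVal X Y c)) := by
  simp only [get_class_wise_denominators_likelihood, class_wise_words_frequency_dict]
  have hbody : (fun (d : PySem.Dict String String) (i : Int) =>
      (if d.contains (PySem.List.pyGetD Y i "") then d
        else d.insert (PySem.List.pyGetD Y i "") "").insert (PySem.List.pyGetD Y i "")
          ((if d.contains (PySem.List.pyGetD Y i "") then d
            else d.insert (PySem.List.pyGetD Y i "") "").getD (PySem.List.pyGetD Y i "") ""
            ++ " " ++ PySem.List.pyGetD X i ""))
      = fun d i => d.insert (PySem.List.pyGetD Y i "")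
          (d.getD (PySem.List.pyGetD Y i "") "" ++ " " ++ PySem.List.pyGetD X i "") := by
    funext d i
    exact stepA_eq d _ "" (fun t => t ++ " " ++ PySem.List.pyGetD X i "")
  rw [hbody, foldl_range_pairs X Y
    (fun d y x => d.insert y (d.getD y "" ++ " " ++ x)) PySem.Dict.empty]
  set cs := (pvPairs X Y).foldl
      (fun d p => d.insert p.1 (d.getD p.1 "" ++ " " ++ p.2)) PySem.Dict.empty with hcs
  have hkeysCS : cs.keys = PySem.Set.ofList ((pvPairs X Y).map (·.1)) := by
    rw [hcs, PySem.Dict.keys_foldl_insert_key (pvPairs X Y) (fun p => p.1)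
      (fun d p => d.getD p.1 "" ++ " " ++ p.2) PySem.Dict.empty]
    rfl
  have hnodupCS : cs.keys.Nodup := by rw [hkeysCS]; exact PySem.Set.nodup_ofList _
  have hgetDCS : ∀ c, cs.getD c ""
      = (((pvPairs X Y).filter (fun p => p.1 == c)).map (·.2)).foldl
          (fun t s => t ++ " " ++ s) "" := by
    intro c
    rw [hcs, getD_groupFold (fun t s => t ++ " " ++ s) "" c]
    rfl
  -- the inner word-count loop is Counter
  have hword : (fun (cd : PySem.Dict String Int) (word : String) =>
      (if cd.contains word then cd else cd.insert word 0).insert word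
        ((if cd.contains word then cd else cd.insert word 0).getD word 0 + 1))
      = fun cd word => cd.insert word (cd.getD word 0 + 1) := by
    funext cd word
    exact stepA_eq cd word 0 (fun t => t + 1)
  rw [hword]
  have hctr : ∀ s : List String,
      s.foldl (fun cd word => cd.insert word (cd.getD word 0 + 1)) PySem.Dict.empty
        = PySem.Dict.counter s := fun s => PySem.Dict.foldl_insert_getD_add_one_eq_counter s
  simp only [hctr]
  -- the frequency-dict loop inserts fresh distinct keys
  have hitemsF := PySem.Dict.items_foldl_insert_fresh cs.keys (fun cn => cn)
    (fun cn => PySem.Dict.counter (PySem.Str.split₀ (cs.getD cn ""))) PySem.Dict.empty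
    (fun a _ => PySem.Dict.contains_empty a) (by simpa using hnodupCS)
  set cwwf := cs.keys.foldl (fun cw cn =>
      cw.insert cn (PySem.Dict.counter (PySem.Str.split₀ (cs.getD cn "")))) PySem.Dict.empty
    with hcwwf
  have hkeysF : cwwf.keys = cs.keys := by
    show cwwf.items.map (·.1) = cs.keys
    rw [hitemsF]
    simp [Function.comp_def, show (PySem.Dict.empty : PySem.Dict String (PySem.Dict String Int)).items = [] from rfl]
  have hgetDF : ∀ c ∈ cs.keys, cwwf.getD c PySem.Dict.empty
      = PySem.Dict.counter (PySem.Str.split₀ (cs.getD c "")) := by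
    intro c hcmem
    apply PySem.Dict.getD_of_mem_items
    · rw [hitemsF]
      simp only [List.mem_append, List.mem_map]
      exact Or.inr ⟨c, hcmem, rfl⟩
    · rw [hkeysF]; exact hnodupCS
  -- the final loop inserts fresh distinct keys too
  rw [PySem.Dict.items_foldl_insert_fresh cwwf.keys (fun cn => cn)
    (fun classes => ((cwwf.getD classes PySem.Dict.empty).values).sum
      + ((PySem.Set.ofList (PySem.Str.split₀
          (X.foldl (fun t s => t ++ " " ++ s) ""))).length : Int))
    PySem.Dict.empty (fun a _ => PySem.Dict.contains_empty a)
    (by rw [hkeysF] at *; simpa using hnodupCS)]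
  simp only [hkeysF, hkeysCS,
    show (PySem.Dict.empty : PySem.Dict String Int).items = [] from rfl, List.nil_append]
  apply List.map_congr_left
  intro c hcmem
  rw [← hkeysCS] at hcmem
  rw [hgetDF c hcmem, counter_values_sum, hgetDCS c, split0_joinSp, split0_joinSp,
    length_flatMap_int, List.map_map, pvVal]
  rfl

theorem portB_eq (X Y : List String) :
    get_class_wise_denominators_likelihood_alt X Y
      = (PySem.Set.ofList ((pvPairs X Y).map (·.1))).map (fun c => (c, pvVal X Y c)) := by
  simp only [get_class_wise_denominators_likelihood_alt]
  rw [foldl_range_pairs X Y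
    (fun d y x => d.insert y (d.getD y 0 + ((PySem.Str.split₀ x).length : Int)))
    PySem.Dict.empty]
  set counts := (pvPairs X Y).foldl
    (fun d p => d.insert p.1 (d.getD p.1 0 + ((PySem.Str.split₀ p.2).length : Int)))
    PySem.Dict.empty with hcounts
  have hkeys : counts.keys = PySem.Set.ofList ((pvPairs X Y).map (·.1)) := by
    rw [hcounts, PySem.Dict.keys_foldl_insert_key (pvPairs X Y) (fun p => p.1)
      (fun d p => d.getD p.1 0 + ((PySem.Str.split₀ p.2).length : Int)) PySem.Dict.empty]
    rfl
  have hnodup : counts.keys.Nodup := by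
    rw [hkeys]; exact PySem.Set.nodup_ofList _
  have hitems := PySem.Dict.items_eq_map_keys counts hnodup 0
  have hgetD : ∀ c, counts.getD c 0
      = (((pvPairs X Y).filter (fun p => p.1 == c)).map
          (fun p => ((PySem.Str.split₀ p.2).length : Int))).sum := by
    intro c
    rw [hcounts, getD_groupFold (fun r s => r + ((PySem.Str.split₀ s).length : Int)) 0 c]
    rw [PySem.List.foldl_add]
    simp only [List.map_map, PySem.Dict.getD_empty, zero_add]
    rfl
  have huniq : X.foldl (fun s x => PySem.Set.update s (PySem.Str.split₀ x)) PySem.Set.empty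
      = PySem.Set.ofList (X.flatMap PySem.Str.split₀) := (ofList_flatMap _ _).symm
  rw [huniq, hitems, hkeys, List.map_map]
  apply List.map_congr_left
  intro c _
  simp only [Function.comp]
  rw [hgetD c]
  rfl

-- ===== VERDICT =====
theorem get_class_wise_denominators_likelihood_spec :
    Claim_equal_get_class_wise_denominators_likelihood := by
  intro X Y _ _
  unfold Spec_get_class_wise_denominators_likelihood
  rw [portA_eq, portB_eq]
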